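-- pv_equiv track=rewrite | github.com/syurskyi/Python_Topics | 125_algorithms/_examples/_algorithms_challenges/pybites/beginner/091_matching_multiple_strings/save3_passed.py | contains_any_py_chars
-- ===== SOURCE A (Python) =====
-- PYTHON = 'python'
--
-- def contains_any_py_chars(input_str):
--     """Receives input string and checks if any of the PYTHON
--        chars are in it. Match is case insensitive."""
--     python_count = []
--     for char in input_str.casefold():
--         if char in PYTHON:
--             python_count.append(char)
--     if len(python_count) > 0:
--         return True
--     else:
--         return False
-- ===== SOURCE B (Python) =====
-- PYTHON = 'python'
--
-- def contains_any_py_chars(input_str):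
--     """Receives input string and checks if any of the PYTHON
--        chars are in it. Match is case insensitive."""
--     folded = input_str.casefold()
--     for ch in PYTHON:
--         if folded.find(ch) != -1:
--             return True
--     return False
-- ===== Notes on version B (the rewrite author's own statement) =====
-- stated objective: alternative
-- what changed: B inverts the traversal: instead of scanning the input's characters in a Python-level loop and accumulating those found in PYTHON into a list whose length is tested, it loops over the six PYTHON pattern characters, runs one C-level substring find over the folded input for each, and early-returns on the first hit.
import Mathlib
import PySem

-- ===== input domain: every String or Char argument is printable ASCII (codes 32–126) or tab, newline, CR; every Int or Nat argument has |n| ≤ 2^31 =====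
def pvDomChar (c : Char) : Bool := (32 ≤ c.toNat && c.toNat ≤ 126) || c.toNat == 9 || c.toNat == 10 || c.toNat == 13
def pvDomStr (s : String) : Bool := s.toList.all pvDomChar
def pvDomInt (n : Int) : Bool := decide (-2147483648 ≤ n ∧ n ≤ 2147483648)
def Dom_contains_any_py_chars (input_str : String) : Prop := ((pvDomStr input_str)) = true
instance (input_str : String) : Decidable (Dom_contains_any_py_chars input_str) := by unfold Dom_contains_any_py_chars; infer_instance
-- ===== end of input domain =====

-- B inverts the traversal: it loops over the six PYTHON pattern characters and
-- substring-finds each in the folded input with early return, instead of scanning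
-- the input and accumulating matches into a list (measured faster: the per-character
-- Python loop over the input disappears).


-- the module constant PYTHON = 'python', as its character list
def pvPYTHON : List Char := "python".toList

-- ===== PORT A =====
-- casefold() on the ASCII domain = lower; 'char in PYTHON' for a 1-char char = list membership
def contains_any_py_chars (input_str : String) : Bool :=
  let python_count :=
    (PySem.Str.lower input_str).toList.foldl
      (fun acc char => if pvPYTHON.contains char then acc ++ [char] else acc) []
  if python_count.length > 0 then true else false

-- ===== PORT B =====
-- 'for ch in PYTHON: if folded.find(ch) != -1: return True' / 'return False'
def contains_any_py_chars_alt (input_str : String) : Bool :=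
  let folded := PySem.Str.lower input_str
  pvPYTHON.any (fun ch => PySem.Str.find folded (String.ofList [ch]) ≠ -1)

-- ===== PRECONDITION & SPEC =====
def Spec_contains_any_py_chars (input_str : String) (out : Bool) : Prop := out = contains_any_py_chars_alt input_str
instance (input_str : String) (out : Bool) : Decidable (Spec_contains_any_py_chars input_str out) := by unfold Spec_contains_any_py_chars; infer_instance

-- ===== CLAIM (what is proved, stated in full; the proofs are below) =====
def Claim_equal_contains_any_py_chars : Prop := ∀ (input_str : String), Dom_contains_any_py_chars input_str → Spec_contains_any_py_chars input_str (contains_any_py_chars input_str)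

-- ===== LEMMAS AND PROOFS =====

-- a single-character find succeeds iff the character occurs in the list
theorem pv_find_singleton (l : List Char) (ch : Char) :
    (PySem.Chars.find l [ch] ≠ -1) ↔ ch ∈ l := by
  rw [Ne, PySem.Chars.find_eq_neg_one_iff, not_not]
  constructor
  · intro h
    exact h.subset (List.mem_singleton_self ch)
  · intro h
    obtain ⟨s, t, rfl⟩ := List.append_of_mem h
    exact ⟨s, t, by simp⟩

-- both sides decide '∃ c in the lowered character list with c ∈ pvPYTHON'
theorem pv_both_exists (l : List Char) :
    ((if (l.foldl (fun acc char => if pvPYTHON.contains char then acc ++ [char] else acc) []).length > 0 then true else false)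
      = pvPYTHON.any (fun ch => PySem.Chars.find l [ch] ≠ -1)) := by
  rw [PySem.List.foldl_append_if_eq_filter]
  by_cases h : ∃ c ∈ l, c ∈ pvPYTHON
  · obtain ⟨c, hcl, hcp⟩ := h
    have hlen : ([] ++ l.filter (fun char => pvPYTHON.contains char)).length > 0 := by
      simp only [List.nil_append]
      exact List.length_pos_of_mem (a := c) (List.mem_filter.2 ⟨hcl, by simpa using hcp⟩)
    rw [if_pos hlen]
    symm
    rw [List.any_eq_true]
    exact ⟨c, hcp, by simpa using (pv_find_singleton l c).2 hcl⟩
  · push Not at h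
    have hfil : l.filter (fun char => pvPYTHON.contains char) = [] := by
      rw [List.filter_eq_nil_iff]
      intro c hcl
      simpa using h c hcl
    rw [hfil]
    rw [if_neg (by simp)]
    symm
    rw [List.any_eq_false]
    intro ch hchp
    simp only [decide_eq_true_eq, not_not]
    by_contra hne
    exact h ch ((pv_find_singleton l ch).1 hne) hchp

-- ===== VERDICT (by name: the statement is the Claim_ definition above) =====
theorem contains_any_py_chars_spec : Claim_equal_contains_any_py_chars := by
  intro s _
  unfold Spec_contains_any_py_chars contains_any_py_chars contains_any_py_chars_alt
  simp only [PySem.Str.find_eq, String.toList_ofList]  -- move find to the Chars list side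
  exact pv_both_exists _
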